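-- pv_equiv track=rewrite | github.com/CodingTam/General_Automation | AutomationFramework_V1/tests/comprehensive_tests/run_comprehensive_tests.py | extract_test_count
-- ===== SOURCE A (Python) =====
-- def extract_test_count(output_lines):
--     """Extract the number of tests run from output lines."""
--     for line in reversed(output_lines):
--         # Look for unittest summary line like "Ran 4 tests in 0.002s"
--         if "Ran " in line and " tests in " in line:
--             try:
--                 count = int(line.split("Ran ")[1].split(" tests")[0])
--                 return count
--             except:
--                 pass
--     return 0
-- ===== SOURCE B (Python) =====
-- def extract_test_count(output_lines):
--     """Extract the number of tests run from output lines.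
--
--     Staged pipeline: select candidate summary lines, parse them all,
--     keep the successful parses, return the last one (or 0 if none).
--     """
--     def parse(line):
--         try:
--             return int(line.split("Ran ")[1].split(" tests")[0])
--         except Exception:
--             return None
--
--     candidates = [l for l in output_lines if "Ran " in l and " tests in " in l]
--     counts = [c for c in map(parse, candidates) if c is not None]
--     return counts[-1] if counts else 0
-- ===== Notes on version B (the rewrite author's own statement) =====
-- stated objective: alternative
-- what changed: Replaces A's reverse scan with early return by a staged declarative pipeline: filter candidate summary lines, parse them all, keep the successful parses, and take the last one (0 if none) -- no scanning loop, no early exit, no accumulator.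
import Mathlib
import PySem

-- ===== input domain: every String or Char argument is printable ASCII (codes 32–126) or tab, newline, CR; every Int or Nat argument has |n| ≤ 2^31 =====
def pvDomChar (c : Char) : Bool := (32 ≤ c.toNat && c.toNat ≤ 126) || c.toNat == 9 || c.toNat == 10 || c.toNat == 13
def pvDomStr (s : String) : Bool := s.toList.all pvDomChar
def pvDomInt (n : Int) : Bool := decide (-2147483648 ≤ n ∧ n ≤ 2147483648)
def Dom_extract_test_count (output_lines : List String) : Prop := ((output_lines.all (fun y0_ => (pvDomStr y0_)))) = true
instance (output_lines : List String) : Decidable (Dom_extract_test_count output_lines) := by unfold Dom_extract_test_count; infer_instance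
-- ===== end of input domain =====

-- B replaces A's reverse early-exit scan by a staged pipeline (filter candidates, parse all, take last success, else 0); return values proved equal.

-- ===== PORT A =====
-- the try-block int(line.split("Ran ")[1].split(" tests")[0]); split? never returns none
-- for nonempty separators, so .getD [] is exact; none = the swallowed exception
def pvParse (line : String) : Option Int :=
  (PySem.List.pyGet? ((PySem.Str.split? line "Ran ").getD []) 1).bind fun t =>
    (PySem.List.pyGet? ((PySem.Str.split? t " tests").getD []) 0).bind fun h =>
      PySem.Int.ofStr? h

-- A's loop over reversed(output_lines) with early return on a successful parse
def pvGoA : List String → Int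
  | [] => 0
  | l :: ls =>
    if PySem.Str.isIn "Ran " l && PySem.Str.isIn " tests in " l then
      match pvParse l with
      | some c => c
      | none => pvGoA ls
    else pvGoA ls

def extract_test_count (output_lines : List String) : Int :=
  pvGoA output_lines.reverse

-- ===== PORT B =====
-- staged pipeline: filter candidate lines, map parse keeping successes, last or 0
def extract_test_count_alt (output_lines : List String) : Int :=
  let candidates := output_lines.filter
    (fun l => PySem.Str.isIn "Ran " l && PySem.Str.isIn " tests in " l)
  let counts := candidates.filterMap pvParse
  match counts.getLast? with
  | some c => c
  | none => 0

-- ===== PRECONDITION & SPEC =====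
def Spec_extract_test_count (output_lines : List String) (out : Int) : Prop := out = extract_test_count_alt output_lines
instance (output_lines : List String) (out : Int) : Decidable (Spec_extract_test_count output_lines out) := by unfold Spec_extract_test_count; infer_instance

-- ===== CLAIM (what is proved, stated in full; the proofs are below) =====
def Claim_equal_extract_test_count : Prop := ∀ (output_lines : List String), Dom_extract_test_count output_lines → Spec_extract_test_count output_lines (extract_test_count output_lines)

-- ===== LEMMAS AND PROOFS =====

-- A's reverse scan returns the head of B's pipeline applied to the reversed list
lemma pvGoA_eq_head (ys : List String) :
    pvGoA ys =
      (((ys.filter (fun l => PySem.Str.isIn "Ran " l && PySem.Str.isIn " tests in " l)).filterMap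
          pvParse).head?).getD 0 := by
  induction ys with
  | nil => simp [pvGoA]
  | cons l ls ih =>
    simp only [pvGoA, List.filter_cons]
    by_cases h : (PySem.Str.isIn "Ran " l && PySem.Str.isIn " tests in " l) = true
    · simp only [h, if_pos, List.filterMap_cons]
      cases pvParse l <;> simp [ih]
    · simp only [h]
      simpa using ih

-- ===== VERDICT (by name: the statement is the Claim_ definition above) =====
theorem extract_test_count_spec : Claim_equal_extract_test_count := by
  intro output_lines _
  unfold Spec_extract_test_count extract_test_count extract_test_count_alt
  rw [pvGoA_eq_head]
  simp only [List.filter_reverse, List.filterMap_reverse, List.head?_reverse]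
  cases h : (List.filterMap pvParse (List.filter _ output_lines)).getLast? <;> simp
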